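-- pv_equiv track=rewrite | github.com/smnuran/470FinalProj | project/testqb.py | compare_answers
-- ===== SOURCE A (Python) =====
-- def compare_answers(str1: str, str2: str):
--     stripped_1 = ''.join(c.lower() for c in str1 if not c.isspace())
--     stripped_2 = ''.join(c.lower() for c in str2 if not c.isspace())
--
--
--     if stripped_1 == stripped_2:
--           return True
--
--     if stripped_1.find(stripped_2) != -1:
--           return True
--
--     if stripped_2.find(stripped_1) != -1:
--           return True
--
--     stripped_1 = stripped_1.replace("_", "")
--     stripped_1 = stripped_1.replace("-", "")
--     stripped_2 = stripped_2.replace("_", "")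
--     stripped_2 = stripped_2.replace("-", "")
--
--     strip = [',','[',']','{','}', '.', '!', '(', ')', ';', ':', '\'',"\""]
--     stripped_1  = stripped_1.translate({ord(c): '' for c in strip})
--     stripped_2 = stripped_2.translate({ord(c): '' for c in strip})
--
--     if stripped_1 == stripped_2:
--           return True
--
--     if stripped_1.find(stripped_2) != -1:
--           return True
--
--     if stripped_2.find(stripped_1) != -1:
--           return True
--
--     return False
-- ===== SOURCE B (Python) =====
-- _REMOVE = set("_-,[]{}.!();:'\"")
--
-- def _normalize(s):
--     # lowercase, then keep only non-whitespace chars outside the removal set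
--     return [c for c in s.lower() if not c.isspace() and c not in _REMOVE]
--
-- def _starts_at(b, i, a):
--     # does a occur in b starting at index i?
--     for j in range(len(a)):
--         if b[i + j] != a[j]:
--             return False
--     return True
--
-- def compare_answers(str1, str2):
--     a = _normalize(str1)
--     b = _normalize(str2)
--     if len(a) > len(b):
--         a, b = b, a
--     # the longer can occur in the shorter only if they are equal, so one
--     # hand-rolled sliding-window search of the shorter in the longer suffices
--     return any(_starts_at(b, i, a) for i in range(len(b) - len(a) + 1))
-- ===== Notes on version B (the rewrite author's own statement) =====
-- stated objective: alternative
-- what changed: B normalizes each string once in a single pass (lowercase, drop whitespace and the whole removal set), orders the two normalized lists by length, and runs one hand-rolled naive sliding-window search of the shorter in the longer, replacing A's two-phase replace/translate chains and its six library equality/find checks.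
import Mathlib
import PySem

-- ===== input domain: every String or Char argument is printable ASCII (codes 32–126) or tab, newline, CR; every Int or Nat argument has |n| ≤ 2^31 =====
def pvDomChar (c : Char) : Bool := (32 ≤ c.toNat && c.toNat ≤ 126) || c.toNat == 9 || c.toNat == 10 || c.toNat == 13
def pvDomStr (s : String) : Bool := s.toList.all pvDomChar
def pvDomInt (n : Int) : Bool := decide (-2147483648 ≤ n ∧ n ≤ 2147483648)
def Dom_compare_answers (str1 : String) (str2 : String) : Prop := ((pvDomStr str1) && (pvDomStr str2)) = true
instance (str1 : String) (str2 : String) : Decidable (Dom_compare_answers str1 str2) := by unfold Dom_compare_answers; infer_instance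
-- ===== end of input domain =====

-- B normalizes each string once, orders the normalized lists by length and runs one hand-rolled
-- naive sliding-window search of the shorter in the longer, instead of A's two normalization
-- phases with six library equality/find checks. (alternative)

-- ===== PORT A =====
-- the translate-deletion character list of A
def pvStrip : List Char := [',', '[', ']', '{', '}', '.', '!', '(', ')', ';', ':', '\'', '"']

-- ''.join(c.lower() for c in s if not c.isspace())
def pvPhase1 (s : String) : List Char :=
  PySem.Chars.join [] ((s.toList.filter (fun c => !PySem.Chars.isspace c)).map
    (fun c => [PySem.Chars.lowerChar c]))

-- the replace("_","") / replace("-","") / translate(delete pvStrip) chain of A's second phase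
-- (translate with a {ord(c): ''} table deletes exactly the chars of pvStrip: ported as a filter, exact)
def pvPhase2 (p : List Char) : List Char :=
  (PySem.Chars.replace (PySem.Chars.replace p ['_'] []) ['-'] []).filter
    (fun c => !pvStrip.contains c)

def compare_answers (str1 : String) (str2 : String) : Bool :=
  let stripped1 := pvPhase1 str1
  let stripped2 := pvPhase1 str2
  if stripped1 = stripped2 then true
  else if PySem.Chars.find stripped1 stripped2 != -1 then true
  else if PySem.Chars.find stripped2 stripped1 != -1 then true
  else
    let t1 := pvPhase2 stripped1
    let t2 := pvPhase2 stripped2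
    if t1 = t2 then true
    else if PySem.Chars.find t1 t2 != -1 then true
    else if PySem.Chars.find t2 t1 != -1 then true
    else false

-- ===== PORT B =====
-- _REMOVE = set("_-,[]{}.!();:'\"")
def pvRemove : List Char := PySem.Set.ofList ("_-,[]{}.!();:'\"".toList)

-- [c for c in s.lower() if not c.isspace() and c not in _REMOVE]
def pvNormalize (s : String) : List Char :=
  (PySem.Str.lower s).toList.filter
    (fun c => !PySem.Chars.isspace c && !pvRemove.contains c)

-- _starts_at(b, i, a): comparing a[j] with b[i+j] left to right = comparing a with b.drop i
-- position by position (exact: every j in range(len(a)) hits b[i+j], i ranges over valid starts)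
def pvStartsAt : List Char → List Char → Bool
  | [], _ => true
  | _ :: _, [] => false
  | c :: a', d :: b' => c == d && pvStartsAt a' b'

def compare_answers_alt (str1 : String) (str2 : String) : Bool :=
  let a := pvNormalize str1
  let b := pvNormalize str2
  let p := if a.length > b.length then (b, a) else (a, b)
  (List.range (p.2.length - p.1.length + 1)).any (fun i => pvStartsAt p.1 (p.2.drop i))

-- ===== PRECONDITION & SPEC =====
def Spec_compare_answers (str1 : String) (str2 : String) (out : Bool) : Prop := out = compare_answers_alt str1 str2
instance (str1 : String) (str2 : String) (out : Bool) : Decidable (Spec_compare_answers str1 str2 out) := by unfold Spec_compare_answers; infer_instance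

-- ===== CLAIM (what is proved, stated in full; the proofs are below) =====
def Claim_equal_compare_answers : Prop := ∀ (str1 : String) (str2 : String), Dom_compare_answers str1 str2 → Spec_compare_answers str1 str2 (compare_answers str1 str2)

-- ===== LEMMAS AND PROOFS =====

-- replace s [c] '' deletes every occurrence of c, i.e. is a filter
lemma pv_go_del (c : Char) : ∀ (l : List Char) (fuel : Nat) (acc : List Char),
    l.length ≤ fuel →
    PySem.Chars.replace.go [c] [] fuel l acc = acc.reverse ++ l.filter (fun x => x != c) := by
  intro l
  induction l with
  | nil =>
      intro fuel acc _
      cases fuel <;> simp [PySem.Chars.replace.go]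
  | cons x t ih =>
      intro fuel acc hlen
      cases fuel with
      | zero => simp at hlen
      | succ n =>
          rw [PySem.Chars.replace.go]
          by_cases hx : c = x
          · subst hx
            simp only [List.isPrefixOf, BEq.rfl, Bool.and_self, if_true, List.length_cons,
              List.length_nil, Nat.zero_add, List.drop_succ_cons, List.drop_zero,
              List.reverse_nil, List.nil_append] at *
            rw [ih n acc (by omega)]
            simp
          · have hbeq : (c == x) = false := by simp [hx]
            simp only [List.isPrefixOf, hbeq, Bool.false_and]
            rw [ih n (x :: acc) (by simp at hlen; omega)]
            have hne : (x != c) = true := by simp [bne]; exact fun h => hx h.symm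
            simp [hne]

lemma pv_replace_del (s : List Char) (c : Char) :
    PySem.Chars.replace s [c] [] = s.filter (fun x => x != c) := by
  rw [PySem.Chars.replace]
  simp only [List.isEmpty_cons]
  simpa using pv_go_del c s s.length [] le_rfl

-- lowercasing never creates or destroys whitespace
lemma pv_isspace_lower (c : Char) :
    PySem.Chars.isspace (PySem.Chars.lowerChar c) = PySem.Chars.isspace c := by
  rw [PySem.Chars.lowerChar]
  by_cases h : PySem.Chars.isupper c = true
  · rw [if_pos h]
    rw [PySem.Chars.isupper] at h
    simp only [Bool.and_eq_true, decide_eq_true_eq, Char.le_def] at h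
    have h65 : 65 ≤ c.toNat := by exact_mod_cast h.1
    have h90 : c.toNat ≤ 90 := by exact_mod_cast h.2
    have hval : (Char.ofNat (c.toNat + 32)).toNat = c.toNat + 32 := by
      rw [Char.toNat_ofNat, if_pos (Or.inl (by omega))]
    rw [Bool.eq_iff_iff]
    simp only [PySem.Chars.isspace, hval, Bool.or_eq_true, Bool.and_eq_true, decide_eq_true_eq]
    omega
  · rw [if_neg h]

-- the removal set of B is '_' :: '-' :: pvStrip
lemma pv_remove_eq : pvRemove = '_' :: '-' :: pvStrip := by decide

-- phase 1 of A is map lowerChar ∘ filter (¬ isspace)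
lemma pv_phase1_eq (s : String) :
    pvPhase1 s = (s.toList.filter (fun c => !PySem.Chars.isspace c)).map PySem.Chars.lowerChar := by
  rw [pvPhase1]
  rw [show (fun c => [PySem.Chars.lowerChar c]) = (fun c => [c]) ∘ PySem.Chars.lowerChar from rfl]
  rw [← List.map_map]
  exact PySem.Chars.join_nil_singletons _

-- phase 2 of A is a triple filter of phase 1
lemma pv_phase2_filter (p : List Char) :
    pvPhase2 p = (p.filter (fun x => x != '_') |>.filter (fun x => x != '-')).filter
      (fun c => !pvStrip.contains c) := by
  rw [pvPhase2, pv_replace_del, pv_replace_del]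

-- A's fully-stripped string equals B's normalized string
lemma pv_phase_eq (s : String) : pvPhase2 (pvPhase1 s) = pvNormalize s := by
  rw [pv_phase2_filter, pv_phase1_eq, pvNormalize]
  simp only [PySem.Str.lower, PySem.Chars.lower, String.toList_ofList]
  rw [List.filter_map, List.filter_map, List.filter_map, List.filter_map,
    List.filter_filter, List.filter_filter, List.filter_filter]
  congr 1
  apply List.filter_congr
  intro c _
  simp only [Function.comp_apply, pv_isspace_lower, pv_remove_eq, List.contains_cons]
  cases hs : PySem.Chars.isspace c <;>
  cases h1 : (PySem.Chars.lowerChar c == '_') <;>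
  cases h2 : (PySem.Chars.lowerChar c == '-') <;>
  cases h3 : pvStrip.contains (PySem.Chars.lowerChar c) <;>
  simp [bne, h1, h2]

-- pvPhase2 preserves the infix relation (it is a composite of filters)
lemma pv_phase2_infix {p q : List Char} (h : p <:+: q) : pvPhase2 p <:+: pvPhase2 q := by
  rw [pv_phase2_filter, pv_phase2_filter]
  exact ((h.filter _).filter _).filter _

-- B's character-by-character matcher is the prefix relation
lemma pv_startsAt_iff : ∀ (a b : List Char), pvStartsAt a b = true ↔ a <+: b := by
  intro a
  induction a with
  | nil => intro b; exact iff_of_true rfl (List.nil_prefix)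
  | cons c a' ih =>
      intro b
      cases b with
      | nil => simp only [pvStartsAt]; simp
      | cons d b' =>
          simp only [pvStartsAt, Bool.and_eq_true, beq_iff_eq, ih, List.cons_prefix_cons]

-- the sliding-window search finds exactly the infix occurrences
lemma pv_search_iff (a b : List Char) :
    ((List.range (b.length - a.length + 1)).any (fun i => pvStartsAt a (b.drop i)) = true)
      ↔ a <:+: b := by
  simp only [List.any_eq_true, List.mem_range, pv_startsAt_iff]
  constructor
  · rintro ⟨i, _, hp⟩
    exact hp.isInfix.trans (List.drop_suffix i b).isInfix
  · rintro ⟨p, q, rfl⟩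
    refine ⟨p.length, by simp; omega, ?_⟩
    rw [show p ++ a ++ q = p ++ (a ++ q) by simp, List.drop_left]
    exact List.prefix_append a q

-- B's value characterized by the mutual infix relation on the normalized lists
lemma pv_alt_iff (s1 s2 : String) :
    compare_answers_alt s1 s2 = true ↔
      pvNormalize s2 <:+: pvNormalize s1 ∨ pvNormalize s1 <:+: pvNormalize s2 := by
  by_cases h : (pvNormalize s1).length > (pvNormalize s2).length
  · rw [compare_answers_alt]; simp only [if_pos h]
    rw [pv_search_iff]
    constructor
    · exact Or.inl
    · rintro (hi | hi)
      · exact hi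
      · have := hi.length_le
        have : pvNormalize s1 = pvNormalize s2 :=
          hi.sublist.eq_of_length (by omega)
        rw [this]
  · rw [compare_answers_alt]; simp only [if_neg h]
    rw [pv_search_iff]
    constructor
    · exact Or.inr
    · simp only [gt_iff_lt, not_lt] at h
      rintro (hi | hi)
      · have := hi.length_le
        have : pvNormalize s2 = pvNormalize s1 :=
          hi.sublist.eq_of_length (by omega)
        rw [← this]
      · exact hi

-- ===== VERDICT (by name: the statement is the Claim_ definition above) =====
theorem compare_answers_spec : Claim_equal_compare_answers := by
  intro str1 str2 _
  unfold Spec_compare_answers compare_answers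
  simp only []
  rw [Bool.eq_iff_iff, pv_alt_iff, ← pv_phase_eq, ← pv_phase_eq]
  set a := pvPhase1 str1 with ha
  set b := pvPhase1 str2 with hb
  split_ifs with h1 h2 h3 h4 h5 h6
  · rw [h1]; simp
  · simp only [bne_iff_ne, ne_eq, PySem.Chars.find_ne_neg_one_iff] at h2
    simp [Or.inl (pv_phase2_infix h2)]
  · simp only [bne_iff_ne, ne_eq, PySem.Chars.find_ne_neg_one_iff] at h3
    simp [Or.inr (pv_phase2_infix h3)]
  · rw [h4]; simp
  · simp only [bne_iff_ne, ne_eq, PySem.Chars.find_ne_neg_one_iff] at h5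
    simp [Or.inl h5]
  · simp only [bne_iff_ne, ne_eq, PySem.Chars.find_ne_neg_one_iff] at h6
    simp [Or.inr h6]
  · simp only [bne_iff_ne, ne_eq, PySem.Chars.find_ne_neg_one_iff] at h5 h6
    simp only [false_iff]
    rintro (h | h)
    · exact h5 h
    · exact h6 h
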